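-- pv_equiv track=rewrite | github.com/offbynull/xplore-path | src/xplore_path/matchers/acronym_matcher.py | _titlecase_extract
-- ===== SOURCE A (Python) =====
-- def _titlecase_extract(val: str) -> str | None:
--     val_it = iter(val)
--     ret = ''
--     current_word = next(val_it, None)
--     if current_word is None or not (current_word.isalnum() and current_word.isupper()):
--         return None
--     for v in val_it:
--         if v.isupper():
--             if current_word == '' or not current_word.isalnum():
--                 return None
--             ret += current_word[0]
--             current_word = v
--         elif v.isalnum():
--             current_word += v
--         else:
--             return None
--     if current_word and current_word.isalnum():
--         ret += current_word[0]
--     return ret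
-- ===== SOURCE B (Python) =====
-- def _titlecase_extract(val: str) -> str | None:
--     # validate: nonempty, starts with an uppercase alnum char, and all chars alnum
--     if not val or not (val[0].isalnum() and val[0].isupper()):
--         return None
--     if not val.isalnum():
--         return None
--     # the acronym is exactly the uppercase characters, in order
--     return ''.join(c for c in val if c.isupper())
-- ===== Notes on version B (the rewrite author's own statement) =====
-- stated objective: simpler
-- what changed: Replaces A's iterator-driven word-boundary state machine (accumulating current_word and emitting its first letter at each boundary) with up-front validation (nonempty, uppercase-alnum first char, all-alnum string) followed by a single filter keeping the uppercase characters.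
import Mathlib
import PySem

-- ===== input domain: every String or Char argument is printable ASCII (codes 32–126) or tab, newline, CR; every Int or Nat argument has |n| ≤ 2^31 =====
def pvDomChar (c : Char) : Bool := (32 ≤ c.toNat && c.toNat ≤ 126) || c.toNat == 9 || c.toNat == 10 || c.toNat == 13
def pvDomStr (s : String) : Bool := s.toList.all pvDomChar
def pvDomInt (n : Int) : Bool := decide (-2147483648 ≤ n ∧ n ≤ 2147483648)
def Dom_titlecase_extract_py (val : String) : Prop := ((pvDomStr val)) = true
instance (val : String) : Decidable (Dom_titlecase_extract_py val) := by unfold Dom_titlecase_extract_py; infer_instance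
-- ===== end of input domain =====

-- B replaces A's word-boundary state machine (current_word accumulation) by up-front
-- validation plus a single uppercase filter; objective: simpler, same O(n) cost.

-- ===== PORT A =====
-- the for-loop over the iterator, with state (ret, current_word); current_word is
-- matched non-empty where Python indexes current_word[0] under a truthiness guard
def tcLoopA : List Char → List Char → List Char → Option String
  | [], ret, [] => some (String.ofList ret)                     -- 'if current_word and …' : empty → skip
  | [], ret, c0 :: cwr =>
      if PySem.Chars.strIsalnum (c0 :: cwr) then some (String.ofList (ret ++ [c0]))
      else some (String.ofList ret)
  | v :: rest, ret, cw =>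
      if PySem.Chars.isupper v then
        match cw with
        | [] => none                                        -- current_word == ''
        | c0 :: cwr =>
            if PySem.Chars.strIsalnum (c0 :: cwr) then tcLoopA rest (ret ++ [c0]) [v]
            else none
      else if PySem.Chars.isalnum v then tcLoopA rest ret (cw ++ [v])
      else none

def titlecase_extract_py (val : String) : Option String :=
  match val.toList with
  | [] => none                                              -- next(val_it, None) is None
  | c :: rest =>
      if PySem.Chars.isalnum c && PySem.Chars.isupper c then tcLoopA rest [] [c]
      else none

-- ===== PORT B =====
def titlecase_extract_py_alt (val : String) : Option String :=
  match val.toList with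
  | [] => none                                              -- not val
  | c :: _ =>
      if PySem.Chars.isalnum c && PySem.Chars.isupper c then
        if PySem.Chars.strIsalnum val.toList then
          some (String.ofList (val.toList.filter PySem.Chars.isupper))
        else none
      else none

-- ===== PRECONDITION & SPEC =====
def Spec_titlecase_extract_py (val : String) (out : Option String) : Prop := out = titlecase_extract_py_alt val
instance (val : String) (out : Option String) : Decidable (Spec_titlecase_extract_py val out) := by unfold Spec_titlecase_extract_py; infer_instance

-- ===== CLAIM (what is proved, stated in full; the proofs are below) =====
def Claim_equal_titlecase_extract_py : Prop := ∀ (val : String), Dom_titlecase_extract_py val → Spec_titlecase_extract_py val (titlecase_extract_py val)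

-- ===== LEMMAS AND PROOFS =====

lemma alnum_of_upper (c : Char) (h : PySem.Chars.isupper c = true) :
    PySem.Chars.isalnum c = true := by
  simp [PySem.Chars.isalnum, PySem.Chars.isalpha, h]

lemma tcLoopA_spec (rest : List Char) (ret : List Char) (c0 : Char) (cwr : List Char)
    (h : PySem.Chars.strIsalnum (c0 :: cwr) = true) :
    tcLoopA rest ret (c0 :: cwr) =
      if rest.all PySem.Chars.isalnum then
        some (String.ofList (ret ++ c0 :: rest.filter PySem.Chars.isupper))
      else none := by
  induction rest generalizing ret c0 cwr with
  | nil => simp [tcLoopA, h]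
  | cons v rs ih =>
    by_cases hu : PySem.Chars.isupper v = true
    · have ha := alnum_of_upper v hu
      have h1 : PySem.Chars.strIsalnum [v] = true := by
        simp [PySem.Chars.strIsalnum, ha]
      simp only [tcLoopA, hu, h, if_pos]
      rw [ih (ret ++ [c0]) v [] h1]
      simp [List.all_cons, ha, hu]
    · by_cases ha : PySem.Chars.isalnum v = true
      · have h2 : PySem.Chars.strIsalnum (c0 :: (cwr ++ [v])) = true := by
          simp [PySem.Chars.strIsalnum] at h ⊢
          exact ⟨h.1, h.2, ha⟩
        have hthis := ih ret c0 (cwr ++ [v]) h2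
        simp only [tcLoopA, hu, ha, Bool.false_eq_true, if_false, if_true]
        rw [List.cons_append, hthis]
        simp [List.all_cons, ha, hu]
      · simp [tcLoopA, hu, ha, List.all_cons]

-- ===== VERDICT (by name: the statement is the Claim_ definition above) =====
theorem titlecase_extract_py_spec : Claim_equal_titlecase_extract_py := by
  intro val _
  unfold Spec_titlecase_extract_py titlecase_extract_py titlecase_extract_py_alt
  cases hval : val.toList with
  | nil => rfl
  | cons c rest =>
    by_cases hc : (PySem.Chars.isalnum c && PySem.Chars.isupper c) = true
    · have hcu : PySem.Chars.isupper c = true := by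
        simpa using (Bool.and_elim_right hc)
      have hca : PySem.Chars.isalnum c = true := by
        simpa using (Bool.and_elim_left hc)
      have h1 : PySem.Chars.strIsalnum [c] = true := by
        simp [PySem.Chars.strIsalnum, hca]
      simp only [hc, if_pos]
      rw [tcLoopA_spec rest [] c [] h1]
      simp [PySem.Chars.strIsalnum, hca, hcu]
    · simp [hc]
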